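-- pv_equiv track=rewrite | github.com/howiealeshire/webscraper2 | webscraper.py | get_rids3
-- ===== SOURCE A (Python) =====
-- def get_rids3(num_records, num_pages):
--     temp_num_records = num_records
--     rid_list = []
--     i = 0
--     page_num = 0
--     if (num_records < 10):
--         small_record_num = 0
--         while small_record_num < num_records:
--             rid_list.append("0" + "x" + str(small_record_num))
--             small_record_num += 1
--         return rid_list
--     else:
--         while page_num < num_pages:
--             while i < 10:
--                 if page_num == 0:
--                     rid_list.append('0' + "x" + str(i))
--                 else:
--                     rid_list.append(str(page_num) + '0' + "x" + str(i))
--                 i += 1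
--             i = 0
--             page_num += 1
--     return rid_list
-- ===== SOURCE B (Python) =====
-- def get_rids3(num_records, num_pages):
--     if num_records < 10:
--         return ["0x" + str(n) for n in range(num_records)]
--     rid_list = []
--     for idx in range(num_pages * 10):
--         page_num, i = divmod(idx, 10)
--         rid_list.append((str(page_num) if page_num > 0 else "") + "0x" + str(i))
--     return rid_list
-- ===== Notes on version B (the rewrite author's own statement) =====
-- stated objective: simpler
-- what changed: Replaced the nested while loops with mutable page/i counters by a single flat loop over range(num_pages*10) that recovers (page_num, i) via divmod, and the small-case while loop by a comprehension.
import Mathlib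
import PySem

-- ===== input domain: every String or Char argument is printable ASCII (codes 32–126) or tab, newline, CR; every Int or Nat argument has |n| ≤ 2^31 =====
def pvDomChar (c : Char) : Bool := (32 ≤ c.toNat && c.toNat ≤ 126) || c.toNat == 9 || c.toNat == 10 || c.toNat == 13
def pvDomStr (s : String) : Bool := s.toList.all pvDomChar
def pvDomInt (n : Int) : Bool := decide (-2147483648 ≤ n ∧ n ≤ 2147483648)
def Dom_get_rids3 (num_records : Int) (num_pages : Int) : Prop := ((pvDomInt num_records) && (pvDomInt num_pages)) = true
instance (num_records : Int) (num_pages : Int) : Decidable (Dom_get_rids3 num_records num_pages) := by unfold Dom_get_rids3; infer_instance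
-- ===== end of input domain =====

-- B replaces A's nested while loops (mutable page_num/i counters) by one flat index loop with divmod,
-- and the small-case while loop by a comprehension; same return value on all inputs (objective: simpler).

-- ===== PORT A =====
-- while small_record_num < num_records: rid_list.append("0"+"x"+str(small_record_num))
def aSmall (num_records : Int) (srn : Int) (acc : List String) : List String :=
  if srn < num_records then
    aSmall num_records (srn + 1) (acc ++ ["0" ++ "x" ++ PySem.Int.toStr srn])
  else acc
termination_by (num_records - srn).toNat
decreasing_by omega

-- inner 'while i < 10' loop
def aInner (page_num : Int) (i : Int) (acc : List String) : List String :=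
  if i < 10 then
    aInner page_num (i + 1)
      (acc ++ [if page_num == 0 then "0" ++ "x" ++ PySem.Int.toStr i
               else PySem.Int.toStr page_num ++ "0" ++ "x" ++ PySem.Int.toStr i])
  else acc
termination_by (10 - i).toNat
decreasing_by omega

-- outer 'while page_num < num_pages' loop (i is shared state, reset to 0 after the inner loop)
def aOuter (num_pages : Int) (page_num : Int) (i : Int) (acc : List String) : List String :=
  if page_num < num_pages then
    aOuter num_pages (page_num + 1) 0 (aInner page_num i acc)
  else acc
termination_by (num_pages - page_num).toNat
decreasing_by omega

def get_rids3 (num_records : Int) (num_pages : Int) : List String :=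
  if num_records < 10 then aSmall num_records 0 []
  else aOuter num_pages 0 0 []

-- ===== PORT B =====
def get_rids3_alt (num_records : Int) (num_pages : Int) : List String :=
  if num_records < 10 then
    (PySem.List.pyRange 0 num_records 1).map (fun n => "0x" ++ PySem.Int.toStr n)
  else
    (PySem.List.pyRange 0 (num_pages * 10) 1).foldl
      (fun acc idx =>
        let page_num := PySem.Int.floordiv idx 10
        let i := PySem.Int.mod idx 10
        acc ++ [(if page_num > 0 then PySem.Int.toStr page_num else "") ++ "0x" ++ PySem.Int.toStr i])
      []

-- ===== PRECONDITION & SPEC =====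
def Spec_get_rids3 (num_records : Int) (num_pages : Int) (out : List String) : Prop := out = get_rids3_alt num_records num_pages
instance (num_records : Int) (num_pages : Int) (out : List String) : Decidable (Spec_get_rids3 num_records num_pages out) := by unfold Spec_get_rids3; infer_instance

-- ===== CLAIM (what is proved, stated in full; the proofs are below) =====
def Claim_equal_get_rids3 : Prop := ∀ (num_records : Int) (num_pages : Int), Dom_get_rids3 num_records num_pages → Spec_get_rids3 num_records num_pages (get_rids3 num_records num_pages)

-- ===== LEMMAS AND PROOFS =====

theorem str_0x' (s : String) : ("0" : String) ++ ("x" ++ s) = "0x" ++ s := by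
  rw [← String.append_assoc]
  rfl

theorem aSmall_eq (n : Int) : ∀ (k : Int) (acc : List String),
    aSmall n k acc = acc ++ (PySem.List.pyRange k n 1).map (fun m => "0x" ++ PySem.Int.toStr m) := by
  intro k acc
  by_cases h : k < n
  · rw [aSmall, if_pos h, aSmall_eq n (k + 1), PySem.List.pyRange_one_cons h]
    simp
  · rw [aSmall, if_neg h, PySem.List.pyRange_one_eq_nil (by omega)]
    simp
termination_by k => (n - k).toNat
decreasing_by omega

def bodyA (p i : Int) : String :=
  if p == 0 then "0" ++ "x" ++ PySem.Int.toStr i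
  else PySem.Int.toStr p ++ "0" ++ "x" ++ PySem.Int.toStr i

theorem aInner_zero (p : Int) (acc : List String) :
    aInner p 0 acc = acc ++ (List.map (bodyA p) [0,1,2,3,4,5,6,7,8,9]) := by
  simp [aInner, bodyA]

theorem aOuter_eq (np : Int) : ∀ (q : Int) (acc : List String), 0 ≤ q →
    aOuter np q 0 acc
      = acc ++ (PySem.List.pyRange q np 1).flatMap (fun p => List.map (bodyA p) [0,1,2,3,4,5,6,7,8,9]) := by
  intro q acc hq
  by_cases h : q < np
  · rw [aOuter, if_pos h, aOuter_eq np (q + 1) _ (by omega), aInner_zero,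
      PySem.List.pyRange_one_cons h]
    simp
  · rw [aOuter, if_neg h, PySem.List.pyRange_one_eq_nil (by omega)]
    simp
termination_by q => (np - q).toNat
decreasing_by omega

def bodyB (idx : Int) : String :=
  (if PySem.Int.floordiv idx 10 > 0 then PySem.Int.toStr (PySem.Int.floordiv idx 10) else "")
    ++ "0x" ++ PySem.Int.toStr (PySem.Int.mod idx 10)

theorem range10 (a : Int) :
    PySem.List.pyRange a (a + 10) 1 = [a, a+1, a+2, a+3, a+4, a+5, a+6, a+7, a+8, a+9] := by
  rw [PySem.List.pyRange_one]
  have h10 : (a + 10 - a).toNat = 10 := by omega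
  rw [h10]
  norm_num [List.range_succ]

theorem bodyB_eq (p k : Int) (hp : 0 ≤ p) (hk0 : 0 ≤ k) (hk : k < 10) :
    bodyB (p * 10 + k) = bodyA p k := by
  have hfd : PySem.Int.floordiv (p * 10 + k) 10 = p := by
    rw [PySem.Int.floordiv_eq_ediv_of_pos (by omega)]; omega
  have hmd : PySem.Int.mod (p * 10 + k) 10 = k := by
    rw [PySem.Int.mod_eq_emod_of_pos (by omega)]; omega
  unfold bodyB bodyA
  rw [hfd, hmd]
  by_cases h0 : p = 0
  · subst h0; simp
  · rw [if_pos (by omega : p > 0), if_neg (by simpa using h0)]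
    simp only [String.append_assoc]
    rw [str_0x']

theorem flatMap_split (m : Nat) :
    (PySem.List.pyRange 0 ((m : Int) * 10) 1).map bodyB
      = (PySem.List.pyRange 0 (m : Int) 1).flatMap (fun p => List.map (bodyA p) [0,1,2,3,4,5,6,7,8,9]) := by
  induction m with
  | zero => simp [PySem.List.pyRange_one_eq_nil]
  | succ m ih =>
    have h1 : PySem.List.pyRange 0 (((m : Int) + 1) * 10) 1
        = PySem.List.pyRange 0 ((m : Int) * 10) 1 ++ PySem.List.pyRange ((m : Int) * 10) ((m : Int) * 10 + 10) 1 := by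
      have := PySem.List.pyRange_one_append 0 ((m : Int) * 10) (((m : Int) + 1) * 10)
        (by positivity) (by omega)
      rw [this]; ring_nf
    have h2 : PySem.List.pyRange 0 ((m : Int) + 1) 1
        = PySem.List.pyRange 0 (m : Int) 1 ++ [(m : Int)] :=
      PySem.List.pyRange_one_succ_right (by positivity)
    push_cast
    rw [h1, h2, List.map_append, List.flatMap_append, ih, range10]
    congr 1
    simp only [List.flatMap_cons, List.flatMap_nil, List.append_nil, List.map]
    have hb : ∀ k : Int, 0 ≤ k → k < 10 → bodyB ((m : Int) * 10 + k) = bodyA (m : Int) k :=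
      fun k h1 h2 => bodyB_eq _ _ (by positivity) h1 h2
    have h0 : bodyB ((m : Int) * 10) = bodyA (m : Int) 0 := by
      simpa using hb 0 le_rfl (by norm_num)
    rw [h0, hb 1 (by norm_num) (by norm_num), hb 2 (by norm_num) (by norm_num),
        hb 3 (by norm_num) (by norm_num), hb 4 (by norm_num) (by norm_num),
        hb 5 (by norm_num) (by norm_num), hb 6 (by norm_num) (by norm_num),
        hb 7 (by norm_num) (by norm_num), hb 8 (by norm_num) (by norm_num),
        hb 9 (by norm_num) (by norm_num)]

-- ===== VERDICT (by name: the statement is the Claim_ definition above) =====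
theorem get_rids3_spec : Claim_equal_get_rids3 := by
  intro nr np _
  unfold Spec_get_rids3 get_rids3 get_rids3_alt
  by_cases h : nr < 10
  · rw [if_pos h, if_pos h, aSmall_eq]
    simp
  · rw [if_neg h, if_neg h]
    rw [PySem.List.foldl_append_singleton_eq_map]
    rw [aOuter_eq np 0 [] le_rfl]
    by_cases hp : 0 ≤ np
    · obtain ⟨m, rfl⟩ := Int.eq_ofNat_of_zero_le hp
      rw [← flatMap_split m]
      simp [bodyB]
    · rw [PySem.List.pyRange_one_eq_nil (by omega), PySem.List.pyRange_one_eq_nil (by omega)]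
      simp
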